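-- pv_equiv track=rewrite | github.com/matias-cavalcante/gasPricesScrapper | scrapOrkan.py | rejectEmptyString
-- ===== SOURCE A (Python) =====
-- def rejectEmptyString(row):
--     numbers = '0123456789'
--     numbersTotal = 0
--     noEmpty = ""
--     for c in range(len(row)):
--         if row[c] != " ":
--             noEmpty = noEmpty + row[c]
--             if row[c] in numbers:
--                 numbersTotal = numbersTotal + 1
--         if numbersTotal == 8:
--             break
--     return noEmpty
-- ===== SOURCE B (Python) =====
-- def rejectEmptyString(row):
--     s = ''.join(c for c in row if c != ' ')
--     positions = [i for i, c in enumerate(s) if c in '0123456789']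
--     if len(positions) >= 8:
--         return s[:positions[7] + 1]
--     return s
-- ===== Notes on version B (the rewrite author's own statement) =====
-- stated objective: simpler
-- what changed: B strips all spaces in one pass, lists the digit positions, and slices the result up to (and including) the 8th digit, instead of A's single character loop accumulating a string with a running digit counter and a break.
import Mathlib
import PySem

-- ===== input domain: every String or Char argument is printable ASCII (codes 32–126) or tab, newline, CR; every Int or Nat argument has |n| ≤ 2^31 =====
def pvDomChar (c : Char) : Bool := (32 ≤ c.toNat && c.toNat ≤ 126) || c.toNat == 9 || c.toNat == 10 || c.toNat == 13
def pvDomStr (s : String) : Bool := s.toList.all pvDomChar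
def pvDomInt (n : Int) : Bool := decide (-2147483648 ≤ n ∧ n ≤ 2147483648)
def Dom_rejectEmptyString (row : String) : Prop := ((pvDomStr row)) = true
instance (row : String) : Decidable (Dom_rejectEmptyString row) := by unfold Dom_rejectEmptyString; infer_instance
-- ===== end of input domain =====

-- B strips all spaces at once, indexes the digit positions and slices up to the 8th digit,
-- instead of A's character loop with a running digit counter and a break (objective: simpler).

-- numbers = '0123456789'
def pvNumbers : List Char := ['0', '1', '2', '3', '4', '5', '6', '7', '8', '9']

-- ===== PORT A =====
-- A's loop over the characters of row with state (numbersTotal, noEmpty) and the break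
-- `if numbersTotal == 8: break` checked after each character.
def pvALoop : List Char → Nat → List Char → List Char
  | [], _, acc => acc
  | c :: rest, total, acc =>
    if c ≠ ' ' then
      let acc' := acc ++ [c]
      let total' := if pvNumbers.contains c then total + 1 else total
      if total' == 8 then acc' else pvALoop rest total' acc'
    else
      if total == 8 then acc else pvALoop rest total acc

def rejectEmptyString (row : String) : String :=
  String.mk (pvALoop row.toList 0 [])

-- ===== PORT B =====
def rejectEmptyString_alt (row : String) : String :=
  let s := row.toList.filter (fun c => c ≠ ' ')          -- ''.join(c for c in row if c != ' ')
  let positions := ((PySem.List.enumerate s 0).filter (fun p => pvNumbers.contains p.2)).map (·.1)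
  if 8 ≤ positions.length then
    String.mk (PySem.List.slice s none (some (positions.getD 7 0 + 1)))   -- s[:positions[7]+1]
  else
    String.mk s

-- ===== PRECONDITION & SPEC =====
def Spec_rejectEmptyString (row : String) (out : String) : Prop := out = rejectEmptyString_alt row
instance (row : String) (out : String) : Decidable (Spec_rejectEmptyString row out) := by unfold Spec_rejectEmptyString; infer_instance

-- ===== CLAIM (what is proved, stated in full; the proofs are below) =====
def Claim_equal_rejectEmptyString : Prop := ∀ (row : String), Dom_rejectEmptyString row → Spec_rejectEmptyString row (rejectEmptyString row)

-- ===== LEMMAS AND PROOFS =====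

-- proof-side characterisation: the non-space prefix up to (and including) the k-th digit
def pvCore : List Char → Nat → List Char
  | [], _ => []
  | c :: rest, k =>
    if c = ' ' then pvCore rest k
    else if pvNumbers.contains c then
      (if k = 1 then [c] else c :: pvCore rest (k - 1))
    else c :: pvCore rest k

-- same, on a space-free list
def pvCore' : List Char → Nat → List Char
  | [], _ => []
  | c :: rest, k =>
    if pvNumbers.contains c then
      (if k = 1 then [c] else c :: pvCore' rest (k - 1))
    else c :: pvCore' rest k

-- digit positions of a list
def pvPos : List Char → List Nat
  | [] => []
  | c :: rest =>
    if pvNumbers.contains c then 0 :: (pvPos rest).map (· + 1)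
    else (pvPos rest).map (· + 1)

theorem pvALoop_eq_core (l : List Char) : ∀ (total : Nat) (acc : List Char),
    total < 8 → pvALoop l total acc = acc ++ pvCore l (8 - total) := by
  induction l with
  | nil => intro total acc _; simp [pvALoop, pvCore]
  | cons c rest ih =>
    intro total acc ht
    have hb : (total == 8) = false := by simp; omega
    by_cases hsp : c = ' '
    · subst hsp
      simp [pvALoop, pvCore, hb, ih total acc ht]
    · by_cases hd : c ∈ pvNumbers
      · by_cases h8 : total + 1 = 8
        · have hk : 8 - total = 1 := by omega
          simp [pvALoop, pvCore, hsp, hd, h8, hk]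
        · have hb' : ((total + 1) == 8) = false := by simp; omega
          have hk : 8 - total ≠ 1 := by omega
          have hk2 : 8 - (total + 1) = 8 - total - 1 := by omega
          simp [pvALoop, pvCore, hsp, hd, hb', hk, hk2,
            ih (total + 1) (acc ++ [c]) (by omega)]
      · simp [pvALoop, pvCore, hsp, hd, hb, ih total (acc ++ [c]) ht]

theorem pvCore_eq_core' (l : List Char) (k : Nat) :
    pvCore l k = pvCore' (l.filter (fun c => c ≠ ' ')) k := by
  induction l generalizing k with
  | nil => simp [pvCore, pvCore']
  | cons c rest ih =>
    by_cases hsp : c = ' '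
    · simp [pvCore, hsp, ih]
    · by_cases hd : c ∈ pvNumbers
      · simp [pvCore, pvCore', hsp, hd, ih]
      · simp [pvCore, pvCore', hsp, hd, ih]

-- digit positions of the enumerated list with start n
theorem pvEnum_pos (s : List Char) : ∀ (n : Int),
    ((PySem.List.enumerate s n).filter (fun p => pvNumbers.contains p.2)).map (·.1)
      = (pvPos s).map (fun j : Nat => n + (j : Int)) := by
  induction s with
  | nil => intro n; simp [PySem.List.enumerate_nil, pvPos]
  | cons c rest ih =>
    intro n
    by_cases hd : pvNumbers.contains c = true
    · simp only [PySem.List.enumerate_cons, List.filter_cons, pvPos]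
      rw [if_pos (by simpa using hd), if_pos hd]
      simp only [List.map_cons, List.map_map]
      rw [ih (n + 1)]
      congr 1
      · simp
      · apply List.map_congr_left
        intro j _
        simp only [Function.comp]
        push_cast
        ring
    · simp only [PySem.List.enumerate_cons, List.filter_cons, pvPos]
      rw [if_neg (by simpa using hd), if_neg hd, ih (n + 1), List.map_map]
      apply List.map_congr_left
      intro j _
      simp only [Function.comp]
      push_cast
      ring

theorem pvCore'_char (s : List Char) : ∀ (k : Nat), 1 ≤ k →
    pvCore' s k = if k ≤ (pvPos s).length then s.take ((pvPos s).getD (k - 1) 0 + 1) else s := by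
  induction s with
  | nil => intro k hk; simp [pvCore', pvPos]
  | cons c rest ih =>
    intro k hk
    by_cases hd : pvNumbers.contains c = true
    · by_cases h1 : k = 1
      · subst h1
        simp only [pvCore', pvPos]
        rw [if_pos hd, if_pos hd]
        simp
      · have hk2 : 2 ≤ k := by omega
        have ihr := ih (k - 1) (by omega)
        simp only [pvCore', pvPos]
        rw [if_pos hd, if_neg h1, if_pos hd, ihr]
        by_cases hle : k - 1 ≤ (pvPos rest).length
        · have hle' : k ≤ ((0 : Nat) :: (pvPos rest).map (· + 1)).length := by
            simp; omega
          have hidx : k - 2 < (pvPos rest).length := by omega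
          rw [if_pos hle, if_pos hle']
          have hgd : ((0 : Nat) :: (pvPos rest).map (· + 1)).getD (k - 1) 0
              = (pvPos rest).getD (k - 2) 0 + 1 := by
            have h : k - 1 = (k - 2) + 1 := by omega
            rw [h, List.getD_cons_succ, List.getD_eq_getElem?_getD,
              List.getD_eq_getElem?_getD, List.getElem?_map,
              List.getElem?_eq_getElem hidx]
            simp
          rw [hgd, List.take_succ_cons]
          have h : k - 1 - 1 = k - 2 := by omega
          rw [h]
        · have hle' : ¬ k ≤ ((0 : Nat) :: (pvPos rest).map (· + 1)).length := by
            simp; omega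
          rw [if_neg hle, if_neg hle']
    · have ihr := ih k hk
      simp only [pvCore', pvPos]
      rw [if_neg hd, if_neg hd, ihr]
      by_cases hle : k ≤ (pvPos rest).length
      · have hle' : k ≤ ((pvPos rest).map (· + 1)).length := by simp; omega
        have hidx : k - 1 < (pvPos rest).length := by omega
        rw [if_pos hle, if_pos hle']
        have hgd : ((pvPos rest).map (· + 1)).getD (k - 1) 0
            = (pvPos rest).getD (k - 1) 0 + 1 := by
          rw [List.getD_eq_getElem?_getD, List.getD_eq_getElem?_getD,
            List.getElem?_map, List.getElem?_eq_getElem hidx]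
          simp
        rw [hgd, List.take_succ_cons]
      · have hle' : ¬ k ≤ ((pvPos rest).map (· + 1)).length := by simp; omega
        rw [if_neg hle, if_neg hle']

theorem pvEnum_pos0 (s : List Char) :
    ((PySem.List.enumerate s 0).filter (fun p => pvNumbers.contains p.2)).map (·.1)
      = (pvPos s).map (fun j : Nat => (j : Int)) := by
  rw [pvEnum_pos s 0]
  apply List.map_congr_left
  intro j _
  simp

-- ===== VERDICT (by name: the statement is the Claim_ definition above) =====
theorem rejectEmptyString_spec : Claim_equal_rejectEmptyString := by
  intro row _
  show String.mk (pvALoop row.toList 0 []) = rejectEmptyString_alt row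
  rw [pvALoop_eq_core row.toList 0 [] (by omega), pvCore_eq_core',
    pvCore'_char _ 8 (by omega), List.nil_append]
  simp only [rejectEmptyString_alt]
  rw [pvEnum_pos0]
  set P := pvPos (row.toList.filter (fun c => c ≠ ' ')) with hP
  rw [List.length_map]
  by_cases hle : 8 ≤ P.length
  · rw [if_pos hle, if_pos hle]
    have hidx : 7 < P.length := by omega
    have hgd : (P.map (fun j : Nat => (j : Int))).getD 7 0 = ((P.getD 7 0 : Nat) : Int) := by
      rw [List.getD_eq_getElem?_getD, List.getD_eq_getElem?_getD,
        List.getElem?_map, List.getElem?_eq_getElem hidx]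
      simp
    have hcast : (P.map (fun j : Nat => (j : Int))).getD 7 0 + 1
        = ((P.getD 7 0 + 1 : Nat) : Int) := by rw [hgd]; push_cast; ring
    rw [hcast, PySem.List.slice_to_natCast]
  · rw [if_neg hle, if_neg hle]
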